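-- pv_equiv track=rewrite | github.com/MohidTheMan3/resumeFailPrint | resume.py | extract_start_commands
-- ===== SOURCE A (Python) =====
-- def extract_start_commands(gcode_lines):
--     start_commands = []
--     for line in gcode_lines:
--         if line.startswith(';'):
--             continue  # Skip comments
--         if any(command in line for command in ['G1', 'G92', 'G28']) and 'E' in line:
--             break  # Stop at the first movement involving the extruder
--         if not any(command in line for command in ['G1', 'G92', 'G28']):
--             start_commands.append(line)
--     return start_commands
-- ===== SOURCE B (Python) =====
-- def extract_start_commands(gcode_lines):
--     def is_g(line):
--         return any(c in line for c in ('G1', 'G92', 'G28'))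
--     stop = next((i for i, line in enumerate(gcode_lines)
--                  if not line.startswith(';') and is_g(line) and 'E' in line),
--                 len(gcode_lines))
--     return [line for line in gcode_lines[:stop]
--             if not line.startswith(';') and not is_g(line)]
-- ===== Notes on version B (the rewrite author's own statement) =====
-- stated objective: idiomatic
-- what changed: A's single loop with continue/break/append is split into two phases: first locate the stop index (the first non-comment extruder move) with next(enumerate-generator), then a list comprehension filters the prefix before that index.
import Mathlib
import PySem

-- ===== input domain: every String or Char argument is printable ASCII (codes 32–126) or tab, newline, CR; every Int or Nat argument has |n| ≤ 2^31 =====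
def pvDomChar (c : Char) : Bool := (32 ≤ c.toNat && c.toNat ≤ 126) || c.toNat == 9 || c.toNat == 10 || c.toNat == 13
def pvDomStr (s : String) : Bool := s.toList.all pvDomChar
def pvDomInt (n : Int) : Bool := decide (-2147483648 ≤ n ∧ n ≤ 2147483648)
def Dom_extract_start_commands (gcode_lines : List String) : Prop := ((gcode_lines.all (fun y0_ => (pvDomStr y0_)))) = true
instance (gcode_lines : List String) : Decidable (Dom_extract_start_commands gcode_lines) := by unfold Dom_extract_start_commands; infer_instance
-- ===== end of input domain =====

-- B splits A's single break/continue loop into two phases: find the stop index, then filter the prefix (idiomatic decomposition, same cost).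


-- ===== PORT A =====
-- the for-loop with continue/break/append, as structural recursion over the lines
def extractA_go : List String → List String
  | [] => []
  | line :: rest =>
    if PySem.Str.startswith line ";" then extractA_go rest          -- continue (skip comments)
    else if (["G1", "G92", "G28"].any fun command => PySem.Str.isIn command line) && PySem.Str.isIn "E" line then
      []                                                            -- break
    else if !(["G1", "G92", "G28"].any fun command => PySem.Str.isIn command line) then
      line :: extractA_go rest                                      -- append
    else extractA_go rest

def extract_start_commands (gcode_lines : List String) : List String :=
  extractA_go gcode_lines

-- ===== PORT B =====
def isG (line : String) : Bool := ["G1", "G92", "G28"].any fun c => PySem.Str.isIn c line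

def extract_start_commands_alt (gcode_lines : List String) : List String :=
  -- stop = next((i for i, line in enumerate(...) if ...), len(gcode_lines))
  let stop := gcode_lines.findIdx fun line =>
    !PySem.Str.startswith line ";" && isG line && PySem.Str.isIn "E" line
  -- [line for line in gcode_lines[:stop] if not line.startswith(';') and not is_g(line)]
  (gcode_lines.take stop).filter fun line => !PySem.Str.startswith line ";" && !isG line

-- ===== PRECONDITION & SPEC =====
def Spec_extract_start_commands (gcode_lines : List String) (out : List String) : Prop := out = extract_start_commands_alt gcode_lines
instance (gcode_lines : List String) (out : List String) : Decidable (Spec_extract_start_commands gcode_lines out) := by unfold Spec_extract_start_commands; infer_instance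

-- ===== CLAIM (what is proved, stated in full; the proofs are below) =====
def Claim_equal_extract_start_commands : Prop := ∀ (gcode_lines : List String), Dom_extract_start_commands gcode_lines → Spec_extract_start_commands gcode_lines (extract_start_commands gcode_lines)

-- ===== LEMMAS AND PROOFS =====
theorem extractA_go_eq_alt (xs : List String) : extractA_go xs = extract_start_commands_alt xs := by
  induction xs with
  | nil => rfl
  | cons x rest ih =>
    simp only [extract_start_commands_alt, isG] at ih ⊢
    cases hs : PySem.Chars.startswith x.toList [';'] <;>
    cases h1 : PySem.Chars.isIn ['G', '1'] x.toList <;>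
    cases h2 : PySem.Chars.isIn ['G', '9', '2'] x.toList <;>
    cases h3 : PySem.Chars.isIn ['G', '2', '8'] x.toList <;>
    cases he : PySem.Chars.isIn ['E'] x.toList <;>
    simp [extractA_go, List.findIdx_cons, hs, h1, h2, h3, he, ih]

-- ===== VERDICT (by name: the statement is the Claim_ definition above) =====
theorem extract_start_commands_spec : Claim_equal_extract_start_commands := by
  intro xs _
  unfold Spec_extract_start_commands extract_start_commands
  exact extractA_go_eq_alt xs
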